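-- pv_equiv track=rewrite | github.com/posl/comment_recommendation | script/split_gen/2_time/zh/246_C/6.py | get_min_price
-- ===== SOURCE A (Python) =====
-- def get_min_price(n, k, x, a):
--     a.sort()
--     price = 0
--     for i in range(n):
--         if k > 0:
--             if a[i] < x:
--                 price += a[i]
--             else:
--                 price += x
--             k -= 1
--         else:
--             price += a[i]
--     return price
-- ===== SOURCE B (Python) =====
-- def _smallest(m, lst):
--     # multiset of the m smallest elements of lst: three-way quickselect partition
--     # around the middle element as pivot
--     if m <= 0:
--         return []
--     if m >= len(lst):
--         return list(lst)
--     p = lst[len(lst) // 2]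
--     lo = [v for v in lst if v < p]
--     eq = [v for v in lst if v == p]
--     hi = [v for v in lst if v > p]
--     if m <= len(lo):
--         return _smallest(m, lo)
--     if m <= len(lo) + len(eq):
--         return lo + eq[:m - len(lo)]
--     return lo + eq + _smallest(m - len(lo) - len(eq), hi)
--
-- def get_min_price(n, k, x, a):
--     s = _smallest(n, a)
--     t = _smallest(min(k, n), s)
--     return sum(s) - sum(max(v - x, 0) for v in t)
-- ===== Notes on version B (the rewrite author's own statement) =====
-- stated objective: alternative
-- what changed: A sorts the whole list and walks indices with a mutable discount counter; B never sorts: it extracts the multiset of the n smallest (and within it the min(k,n) smallest) by recursive quickselect-style pivot partitioning, then subtracts the excess max(v-x,0) over the discounted items from their sum.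
import Mathlib
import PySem

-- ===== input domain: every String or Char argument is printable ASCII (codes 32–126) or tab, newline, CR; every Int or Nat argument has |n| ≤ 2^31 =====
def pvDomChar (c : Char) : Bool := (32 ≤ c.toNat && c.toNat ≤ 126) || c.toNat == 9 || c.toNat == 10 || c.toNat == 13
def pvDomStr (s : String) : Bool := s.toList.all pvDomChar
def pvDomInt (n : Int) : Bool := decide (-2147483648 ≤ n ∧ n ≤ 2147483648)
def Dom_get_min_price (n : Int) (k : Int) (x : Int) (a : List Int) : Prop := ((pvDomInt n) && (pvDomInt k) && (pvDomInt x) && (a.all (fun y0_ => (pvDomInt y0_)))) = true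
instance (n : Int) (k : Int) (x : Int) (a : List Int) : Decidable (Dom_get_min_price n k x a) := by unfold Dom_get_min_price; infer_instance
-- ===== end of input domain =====

-- B avoids sorting entirely: a recursive quickselect-style partition extracts the multiset of
-- the n smallest (and within it the min(k,n) smallest) items, then subtracts the discount
-- excess from their sum. Equivalence is about the RETURN value only: A sorts `a` in place, B
-- does not mutate it.

-- ===== PORT A =====
def get_min_price (n : Int) (k : Int) (x : Int) (a : List Int) : Int :=
  let s := PySem.List.sorted a (fun v => v)
  let r := (PySem.List.pyRange 0 n 1).foldl
    (fun (st : Int × Int) i =>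
      let ai := PySem.List.pyGetD s i 0   -- a[i]; in range under Pre_
      if st.2 > 0 then
        (if ai < x then st.1 + ai else st.1 + x, st.2 - 1)
      else
        (st.1 + ai, st.2))
    (0, k)
  r.1

-- ===== PORT B =====
-- _smallest from Source B: the m smallest elements of lst as a multiset, by a three-way
-- quickselect partition around the middle element as pivot.
def pvSmallest (m : Int) (lst : List Int) : List Int :=
  if m ≤ 0 then []
  else if (lst.length : Int) ≤ m then lst
  else
    let p := lst.getD (lst.length / 2) 0
    let lo := lst.filter (fun v => decide (v < p))
    let eq := lst.filter (fun v => decide (v = p))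
    let hi := lst.filter (fun v => decide (p < v))
    if m ≤ (lo.length : Int) then pvSmallest m lo
    else if m ≤ (lo.length : Int) + eq.length then lo ++ eq.take (m - lo.length).toNat
    else lo ++ eq ++ pvSmallest (m - lo.length - eq.length) hi
termination_by lst.length
decreasing_by
  all_goals
    simp only [List.length_unattach]
    have hne : lst ≠ [] := by intro h; subst h; simp at *; omega
    have hlt : lst.length / 2 < lst.length :=
      Nat.div_lt_self (List.length_pos_of_ne_nil hne) (by omega)
    refine lt_of_lt_of_le
      (List.length_filter_lt_length_iff_exists.2
        ⟨⟨lst[lst.length / 2], List.getElem_mem hlt⟩, List.mem_attach _ _, ?_⟩)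
      (le_of_eq (by simp))
    simp [List.getD, List.getElem?_eq_getElem hlt]

def get_min_price_alt (n : Int) (k : Int) (x : Int) (a : List Int) : Int :=
  let s := pvSmallest n a
  let t := pvSmallest (min k n) s
  (s.foldl (· + ·) 0) - (t.foldl (fun acc v => acc + max (v - x) 0) 0)

-- ===== PRECONDITION & SPEC =====
-- Pre_ excludes only n > len(a), where A raises IndexError.
def Pre_get_min_price (n : Int) (k : Int) (x : Int) (a : List Int) : Prop :=
  n ≤ a.length

instance (n : Int) (k : Int) (x : Int) (a : List Int) : Decidable (Pre_get_min_price n k x a) := by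
  unfold Pre_get_min_price; infer_instance

def pvWitness_get_min_price : Int × Int × Int × List Int := (2, 1, 5, [3, 10])

def Spec_get_min_price (n : Int) (k : Int) (x : Int) (a : List Int) (out : Int) : Prop := out = get_min_price_alt n k x a
instance (n : Int) (k : Int) (x : Int) (a : List Int) (out : Int) : Decidable (Spec_get_min_price n k x a out) := by unfold Spec_get_min_price; infer_instance

-- ===== CLAIM (what is proved, stated in full; the proofs are below) =====
def Claim_equal_get_min_price : Prop := ∀ (n : Int) (k : Int) (x : Int) (a : List Int), Dom_get_min_price n k x a → Pre_get_min_price n k x a → Spec_get_min_price n k x a (get_min_price n k x a)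

-- ===== LEMMAS AND PROOFS =====

-- A's loop body over an element list, with general start state.
theorem gmp_loop_eq (x : Int) : ∀ (l : List Int) (k p : Int),
    (l.foldl
      (fun (st : Int × Int) ai =>
        if st.2 > 0 then
          (if ai < x then st.1 + ai else st.1 + x, st.2 - 1)
        else
          (st.1 + ai, st.2))
      (p, k)).1
    = p + l.sum - ((l.take k.toNat).map (fun v => max (v - x) 0)).sum := by
  intro l
  induction l with
  | nil => intro k p; simp
  | cons a l ih =>
    intro k p
    by_cases hk : k > 0
    · have hsp : k.toNat = (k - 1).toNat + 1 := by omega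
      simp only [List.foldl_cons, hk, if_pos, List.sum_cons, hsp, List.take_succ_cons,
        List.map_cons]
      rw [ih (k - 1) (if a < x then p + a else p + x)]
      by_cases hax : a < x
      · rw [if_pos hax]
        have : max (a - x) 0 = 0 := by omega
        rw [this]; ring
      · rw [if_neg hax]
        have : max (a - x) 0 = a - x := by omega
        rw [this]; ring
    · have hz : k.toNat = 0 := by omega
      simp only [List.foldl_cons, List.sum_cons, hz, List.take_zero, List.map_nil,
        List.sum_nil]
      rw [if_neg hk, ih k]
      rw [hz, List.take_zero]
      simp; ring

theorem gmp_fold_sum (l : List Int) : l.foldl (· + ·) 0 = l.sum := by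
  rw [List.sum_eq_foldl]

theorem gmp_fold_excess (x : Int) (l : List Int) :
    l.foldl (fun acc v => acc + max (v - x) 0) 0
      = (l.map (fun v => max (v - x) 0)).sum := by
  induction l using List.reverseRecOn with
  | nil => simp
  | append_singleton l a ih => simp [ih]

-- pvSmallest m lst is a permutation of the length-m prefix of the sorted list.
theorem pvSmallest_perm (lst : List Int) (m : Int) :
    (pvSmallest m lst).Perm ((PySem.List.sorted lst (fun v => v)).take m.toNat) := by
  rw [pvSmallest.eq_def]
  by_cases h0 : m ≤ 0
  · simp [h0, show m.toNat = 0 by omega]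
  · rw [if_neg h0]
    by_cases hlen : (lst.length : Int) ≤ m
    · rw [if_pos hlen]
      have : (PySem.List.sorted lst (fun v => v)).take m.toNat
          = PySem.List.sorted lst (fun v => v) := by
        apply List.take_of_length_le
        rw [PySem.List.length_sorted]; omega
      rw [this]
      exact (PySem.List.sorted_perm lst (fun v => v) false).symm
    · rw [if_neg hlen]
      simp only
      set p := lst.getD (lst.length / 2) 0 with hp
      set lo := lst.filter (fun v => decide (v < p)) with hlo
      set eq := lst.filter (fun v => decide (v = p)) with heq
      set hi := lst.filter (fun v => decide (p < v)) with hhi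
      -- three-way partition permutation
      have hperm3 : (lo ++ eq ++ hi).Perm lst := by
        have h1 : (lo ++ lst.filter (fun v => !(decide (v < p)))).Perm lst :=
          List.filter_append_perm _ lst
        have h2 : eq = (lst.filter (fun v => !(decide (v < p)))).filter (fun v => decide (v = p)) := by
          rw [List.filter_filter, heq]
          apply List.filter_congr
          intro v _
          by_cases hv : v = p <;> simp [hv]
        have h3 : hi = (lst.filter (fun v => !(decide (v < p)))).filter (fun v => !(decide (v = p))) := by
          rw [List.filter_filter, hhi]
          apply List.filter_congr
          intro v _
          by_cases hv : p < v <;> simp [hv] <;> omega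
        have h4 : (eq ++ hi).Perm (lst.filter (fun v => !(decide (v < p)))) := by
          rw [h2, h3]
          exact List.filter_append_perm _ _
        have h5 : (lo ++ eq ++ hi).Perm (lo ++ lst.filter (fun v => !(decide (v < p)))) := by
          rw [List.append_assoc]
          exact List.Perm.append_left lo h4
        exact h5.trans h1
      have hmem_lo : ∀ v ∈ lo, v < p := by
        intro v hv; have := List.of_mem_filter hv; simpa using this
      have hmem_eq : ∀ v ∈ eq, v = p := by
        intro v hv; have := List.of_mem_filter hv; simpa using this
      have hmem_hi : ∀ v ∈ hi, p < v := by
        intro v hv; have := List.of_mem_filter hv; simpa using this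
      -- sorted lst splits along the partition
      have hsplit : PySem.List.sorted lst (fun v => v)
          = PySem.List.sorted lo (fun v => v) ++ eq ++ PySem.List.sorted hi (fun v => v) := by
        apply PySem.List.sorted_id_eq_of_perm_of_pairwise
        · exact (List.Perm.append
              (List.Perm.append (PySem.List.sorted_perm _ _ false) (List.Perm.refl eq))
              (PySem.List.sorted_perm _ _ false)).trans hperm3
        · rw [List.pairwise_append]
          refine ⟨?_, PySem.List.sorted_pairwise hi (fun v => v), ?_⟩
          · rw [List.pairwise_append]
            refine ⟨PySem.List.sorted_pairwise lo (fun v => v), ?_, ?_⟩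
            · exact List.pairwise_of_forall_mem_list
                (fun a ha b hb => by rw [hmem_eq a ha, hmem_eq b hb])
            · intro b hb c hc
              have hbl := hmem_lo b ((PySem.List.mem_sorted _ _ _ _).1 hb)
              have := hmem_eq c hc
              omega
          · intro b hb c hc
            have hcc := hmem_hi c ((PySem.List.mem_sorted _ _ _ _).1 hc)
            rcases List.mem_append.1 hb with hb | hb
            · have := hmem_lo b ((PySem.List.mem_sorted _ _ _ _).1 hb); omega
            · have := hmem_eq b hb; omega
      rw [hsplit]
      have hlolen : (PySem.List.sorted lo (fun v => v)).length = lo.length :=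
        PySem.List.length_sorted lo (fun v => v) false
      have hhilen : (PySem.List.sorted hi (fun v => v)).length = hi.length :=
        PySem.List.length_sorted hi (fun v => v) false
      by_cases hm1 : m ≤ (lo.length : Int)
      · rw [if_pos hm1]
        have htk : (PySem.List.sorted lo (fun v => v) ++ eq ++ PySem.List.sorted hi (fun v => v)).take m.toNat
            = (PySem.List.sorted lo (fun v => v)).take m.toNat := by
          rw [List.append_assoc]
          apply List.take_append_of_le_length
          rw [hlolen]; omega
        rw [htk]
        exact pvSmallest_perm lo m
      · rw [if_neg hm1]
        by_cases hm2 : m ≤ (lo.length : Int) + eq.length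
        · rw [if_pos hm2]
          have htk : (PySem.List.sorted lo (fun v => v) ++ eq ++ PySem.List.sorted hi (fun v => v)).take m.toNat
              = PySem.List.sorted lo (fun v => v) ++ eq.take (m - lo.length).toNat := by
            rw [List.append_assoc, List.take_append, List.take_of_length_le (by rw [hlolen]; omega),
              List.take_append, hlolen]
            have h5 : m.toNat - lo.length - eq.length = 0 := by omega
            have h6 : m.toNat - lo.length = (m - lo.length).toNat := by omega
            rw [h5, h6]
            simp
          rw [htk]
          exact List.Perm.append (PySem.List.sorted_perm lo (fun v => v) false).symm
            (List.Perm.refl _)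
        · rw [if_neg hm2]
          have htk : (PySem.List.sorted lo (fun v => v) ++ eq ++ PySem.List.sorted hi (fun v => v)).take m.toNat
              = PySem.List.sorted lo (fun v => v) ++ eq
                ++ (PySem.List.sorted hi (fun v => v)).take (m - lo.length - eq.length).toNat := by
            have hlen2 : (PySem.List.sorted lo (fun v => v) ++ eq).length ≤ m.toNat := by
              simp only [List.length_append, hlolen]; omega
            rw [List.take_append, List.take_of_length_le hlen2]
            congr 2
            simp only [List.length_append, hlolen]
            omega
          rw [htk]
          exact List.Perm.append
            (List.Perm.append (PySem.List.sorted_perm lo (fun v => v) false).symm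
              (List.Perm.refl eq))
            (pvSmallest_perm hi (m - lo.length - eq.length))
termination_by lst.length
decreasing_by
  · refine List.length_filter_lt_length_iff_exists.2 ⟨p, ?_, by simp [hp]⟩
    have hne : lst ≠ [] := by intro h; subst h; simp at hlen; omega
    have hlt : lst.length / 2 < lst.length := Nat.div_lt_self (List.length_pos_of_ne_nil hne) (by omega)
    rw [hp, List.getD_eq_getElem lst 0 hlt]
    exact List.getElem_mem hlt
  · refine List.length_filter_lt_length_iff_exists.2 ⟨p, ?_, by simp [hp]⟩
    have hne : lst ≠ [] := by intro h; subst h; simp at hlen; omega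
    have hlt : lst.length / 2 < lst.length := Nat.div_lt_self (List.length_pos_of_ne_nil hne) (by omega)
    rw [hp, List.getD_eq_getElem lst 0 hlt]
    exact List.getElem_mem hlt

-- ===== VERDICT (by name: the statement is the Claim_ definition above) =====
theorem get_min_price_spec : Claim_equal_get_min_price := by
  intro n k x a _ hpre
  have hnle : n ≤ (a.length : Int) := hpre
  unfold Spec_get_min_price get_min_price get_min_price_alt
  set srt := PySem.List.sorted a (fun v => v) with hsrt
  have hlen : srt.length = a.length := PySem.List.length_sorted a (fun v => v) false
  -- the prefix A's loop visits
  set t : List Int := srt.take (max 0 n).toNat with ht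
  have htlen : t.length = n.toNat := by
    simp [ht]; omega
  -- A's fold over range(n) indexing srt = fold over t
  have hrange : PySem.List.pyRange 0 n 1 = PySem.List.pyRange 0 (t.length : Int) 1 := by
    rw [PySem.List.pyRange_one, PySem.List.pyRange_one, htlen]
    congr 2
    omega
  have hstep : ∀ (st : Int × Int) (i : Int), i ∈ PySem.List.pyRange 0 (t.length : Int) 1 →
      (fun (st : Int × Int) i =>
        let ai := PySem.List.pyGetD srt i 0
        if st.2 > 0 then
          (if ai < x then st.1 + ai else st.1 + x, st.2 - 1)
        else
          (st.1 + ai, st.2)) st i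
      = (fun (st : Int × Int) i =>
        let ai := PySem.List.pyGetD t i 0
        if st.2 > 0 then
          (if ai < x then st.1 + ai else st.1 + x, st.2 - 1)
        else
          (st.1 + ai, st.2)) st i := by
    intro st i hi
    have hmem := (PySem.List.mem_pyRange_one).1 hi
    have h0 : 0 ≤ i := hmem.1
    have hin : i < (t.length : Int) := hmem.2
    have hgd : PySem.List.pyGetD srt i 0 = PySem.List.pyGetD t i 0 := by
      rw [PySem.List.pyGetD_eq_getElem (xs := srt) (i := i) (d := 0) h0 (by omega),
          PySem.List.pyGetD_eq_getElem (xs := t) (i := i) (d := 0) h0 (by omega)]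
      simp only [ht, List.getElem_take]
    simp only [hgd]
  have hA : (PySem.List.pyRange 0 n 1).foldl
      (fun (st : Int × Int) i =>
        let ai := PySem.List.pyGetD srt i 0
        if st.2 > 0 then
          (if ai < x then st.1 + ai else st.1 + x, st.2 - 1)
        else
          (st.1 + ai, st.2)) (0, k)
      = t.foldl
      (fun (st : Int × Int) ai =>
        if st.2 > 0 then
          (if ai < x then st.1 + ai else st.1 + x, st.2 - 1)
        else
          (st.1 + ai, st.2)) (0, k) := by
    rw [hrange]
    have h1 := PySem.List.foldl_congr_mem _ _ _ ((0:Int), k) hstep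
    rw [h1]
    exact PySem.List.foldl_pyRange_zero_pyGetD' t 0
      (fun (st : Int × Int) ai =>
        if st.2 > 0 then (if ai < x then st.1 + ai else st.1 + x, st.2 - 1)
        else (st.1 + ai, st.2)) (((0 : Int)), k)
  -- B's selections
  have hs : (pvSmallest n a).Perm t := by
    have := pvSmallest_perm a n
    rw [← hsrt] at this
    have hte : srt.take n.toNat = t := by rw [ht]; congr 1; omega
    rw [hte] at this
    exact this
  -- sorted (pvSmallest n a) = t (both sorted, permutations of each other)
  have hsorted_s : PySem.List.sorted (pvSmallest n a) (fun v => v) = t := by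
    apply PySem.List.sorted_id_eq_of_perm_of_pairwise
    · exact hs.symm
    · exact List.Pairwise.sublist (List.take_sublist _ _) (PySem.List.sorted_pairwise a (fun v => v))
  have htsel : (pvSmallest (min k n) (pvSmallest n a)).Perm (t.take k.toNat) := by
    have := pvSmallest_perm (pvSmallest n a) (min k n)
    rw [hsorted_s] at this
    have : (pvSmallest (min k n) (pvSmallest n a)).Perm (t.take (min k n).toNat) := this
    have heq : t.take (min k n).toNat = t.take k.toNat := by
      rw [ht, List.take_take, List.take_take]
      congr 1
      omega
    rw [heq] at this
    exact this
  simp only [hA, gmp_loop_eq, gmp_fold_sum, gmp_fold_excess]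
  rw [hs.sum_eq, (htsel.map (fun v => max (v - x) 0)).sum_eq]
  ring
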